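-- pv_equiv track=rewrite | github.com/collinsakenga/codewars_solutions | 6 kyu/Consonant value.py | solve
-- ===== SOURCE A (Python) =====
-- def solve(s):
--     index=0
--     #replace vowels with " "
--     for char in s:
--         if char in "aeiou":
--             s=s[:index]+" "+s[index+1:]
--         index+=1
--     total=0
--     comp=0
--     for word in s.split():
--         #calculate word value
--         for char in word:
--             comp+=ord(char)-ord("a")+1
--         #get the max value
--         if comp>total:
--             total=comp
--         #reset variable
--         comp=0
--     return total
-- ===== SOURCE B (Python) =====
-- def solve(s):
--     total = comp = 0
--     for c in s:
--         if c in "aeiou" or c.isspace():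
--             if comp > total:
--                 total = comp
--             comp = 0
--         else:
--             comp += ord(c) - 96
--     return comp if comp > total else total
-- ===== Notes on version B (the rewrite author's own statement) =====
-- stated objective: faster
-- what changed: A rebuilds the whole string by slicing for every vowel, then splits and re-scans each word; B is a single left-to-right pass that accumulates the current consonant-run value, resets it at vowels/whitespace, and tracks the running maximum.
import Mathlib
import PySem

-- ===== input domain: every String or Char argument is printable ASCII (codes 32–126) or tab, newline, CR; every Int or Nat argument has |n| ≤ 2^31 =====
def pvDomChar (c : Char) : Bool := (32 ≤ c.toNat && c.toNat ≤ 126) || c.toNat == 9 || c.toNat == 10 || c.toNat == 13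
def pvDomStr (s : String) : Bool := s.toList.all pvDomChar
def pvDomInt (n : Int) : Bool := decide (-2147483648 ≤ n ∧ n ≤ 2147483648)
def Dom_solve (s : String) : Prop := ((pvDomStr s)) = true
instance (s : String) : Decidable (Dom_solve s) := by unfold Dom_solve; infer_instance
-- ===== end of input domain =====

-- B replaces A's quadratic slice-and-rebuild-then-split with a single O(n) pass (run sum, reset on vowel/whitespace, track max).

-- ===== PORT A =====
-- 'char in "aeiou"'
def solveVowel (c : Char) : Bool := ['a', 'e', 'i', 'o', 'u'].contains c

-- first loop of A: walk the original characters with an index, splicing ' ' over each vowel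
def solveRepl (cs : List Char) : List Char :=
  (cs.foldl
    (fun (st : List Char × Int) ch =>
      if solveVowel ch then
        (PySem.List.slice st.1 none (some st.2) ++ [' ']
           ++ PySem.List.slice st.1 (some (st.2 + 1)) none, st.2 + 1)
      else (st.1, st.2 + 1))
    (cs, 0)).1

-- inner loop of A: comp += ord(char) - ord('a') + 1
def solveWordVal (w : List Char) : Int :=
  w.foldl (fun comp ch => comp + ((ch.toNat : Int) - 97 + 1)) 0

def solve (s : String) : Int :=
  (PySem.Chars.split₀ (solveRepl s.toList)).foldl
    (fun total w =>
      let comp := solveWordVal w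
      if comp > total then comp else total) 0

-- ===== PORT B =====
def solve_alt (s : String) : Int :=
  let p := s.toList.foldl
    (fun (p : Int × Int) c =>
      if solveVowel c || PySem.Chars.isspace c then
        (if p.2 > p.1 then p.2 else p.1, 0)
      else (p.1, p.2 + ((c.toNat : Int) - 96)))
    (0, 0)
  if p.2 > p.1 then p.2 else p.1

-- ===== PRECONDITION & SPEC =====
def Spec_solve (s : String) (out : Int) : Prop := out = solve_alt s
instance (s : String) (out : Int) : Decidable (Spec_solve s out) := by unfold Spec_solve; infer_instance

-- ===== CLAIM (what is proved, stated in full; the proofs are below) =====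
def Claim_equal_solve : Prop := ∀ (s : String), Dom_solve s → Spec_solve s (solve s)

-- ===== LEMMAS AND PROOFS =====

-- the character map A's first loop implements
def pvF (c : Char) : Char := if solveVowel c then ' ' else c

-- per-character value
def pvVal (c : Char) : Int := (c.toNat : Int) - 96

lemma solveWordVal_eq (w : List Char) : solveWordVal w = (w.map pvVal).sum := by
  have h : ∀ (a : Int), w.foldl (fun comp ch => comp + ((ch.toNat : Int) - 97 + 1)) a
      = a + (w.map pvVal).sum := by
    induction w with
    | nil => simp [List.foldl]
    | cons c t ih =>
      intro a
      simp only [List.foldl, List.map, List.sum_cons, ih, pvVal]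
      ring
  simpa using h 0

lemma pvSumRev (cur : List Char) : (cur.reverse.map pvVal).sum = (cur.map pvVal).sum := by
  rw [List.map_reverse, List.sum_reverse]

lemma solveRepl_inv (cs pre : List Char) :
    (cs.foldl
      (fun (st : List Char × Int) ch =>
        if solveVowel ch then
          (PySem.List.slice st.1 none (some st.2) ++ [' ']
             ++ PySem.List.slice st.1 (some (st.2 + 1)) none, st.2 + 1)
        else (st.1, st.2 + 1))
      (pre.map pvF ++ cs, (pre.length : Int))).1 = pre.map pvF ++ cs.map pvF := by
  induction cs generalizing pre with
  | nil => simp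
  | cons c t ih =>
    have hstep : ∀ h : Char, h = pvF c → pre.map pvF ++ h :: t = (pre ++ [c]).map pvF ++ t := by
      intro h hh; simp [hh]
    have hlen : (pre.length : Int) + 1 = (((pre ++ [c]).length : Nat) : Int) := by
      simp
    simp only [List.foldl_cons]
    by_cases hv : solveVowel c = true
    · rw [if_pos hv]
      have h1 : PySem.List.slice (pre.map pvF ++ c :: t) none (some (pre.length : Int))
          = pre.map pvF := by
        rw [PySem.List.slice_to _ (by positivity)]
        simp
      have h2 : PySem.List.slice (pre.map pvF ++ c :: t) (some ((pre.length : Int) + 1)) none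
          = t := by
        rw [PySem.List.slice_from _ (by positivity)]
        have he : ((pre.length : Int) + 1).toNat = ((pre.map pvF) ++ [c]).length := by
          simp
        have hsp : pre.map pvF ++ c :: t = (pre.map pvF ++ [c]) ++ t := by simp
        rw [he, hsp, List.drop_left]
      have hsp2 : pre.map pvF ++ [' '] ++ t = (pre ++ [c]).map pvF ++ t := by
        simp [pvF, hv]
      rw [h1, h2, hsp2, hlen, ih (pre ++ [c])]
      simp [pvF, hv]
    · rw [if_neg hv, hstep c (by simp [pvF, hv]), hlen, ih (pre ++ [c])]
      simp [pvF, hv]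

lemma solveRepl_eq_map (cs : List Char) : solveRepl cs = cs.map pvF := by
  have := solveRepl_inv cs []
  simpa [solveRepl] using this

-- split₀.go's accumulator just holds already-finished words
lemma split₀_go_acc (cs : List Char) (cur : List Char) (acc : List (List Char)) :
    PySem.Chars.split₀.go cs cur acc = acc.reverse ++ PySem.Chars.split₀.go cs cur [] := by
  induction cs generalizing cur acc with
  | nil =>
    simp only [PySem.Chars.split₀.go]
    by_cases h : cur.isEmpty
    · simp [h]
    · simp [h]
  | cons c t ih =>
    simp only [PySem.Chars.split₀.go]
    by_cases hs : PySem.Chars.isspace c = true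
    · by_cases h : cur.isEmpty
      · simp only [hs, h, if_true]
        exact ih [] acc
      · simp only [hs, h, if_true, if_false, Bool.false_eq_true]
        rw [ih [] (cur.reverse :: acc), ih [] [cur.reverse]]
        simp
    · simp only [hs, Bool.false_eq_true, ite_false]
      exact ih (c :: cur) acc

-- A's max-fold over (split₀.go cs cur []) equals B's single pass, given the run invariant
lemma main_inv (cs : List Char) (cur : List Char) (t : Int) (ht : 0 ≤ t) :
    (PySem.Chars.split₀.go cs cur []).foldl
        (fun total w => let comp := solveWordVal w; if comp > total then comp else total) t
    = (let p := cs.foldl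
        (fun (p : Int × Int) c =>
          if PySem.Chars.isspace c then
            (if p.2 > p.1 then p.2 else p.1, 0)
          else (p.1, p.2 + pvVal c))
        (t, (cur.map pvVal).sum)
      if p.2 > p.1 then p.2 else p.1) := by
  induction cs generalizing cur t with
  | nil =>
    simp only [PySem.Chars.split₀.go, List.foldl]
    by_cases h : cur.isEmpty
    · have : cur = [] := List.isEmpty_iff.mp h
      subst this
      simp only [h, if_true, List.reverse_nil, List.foldl]
      have : ¬ ((0 : Int) > t) := by omega
      simp [this]
    · simp only [h, Bool.false_eq_true, ite_false, List.reverse_cons, List.reverse_nil,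
        List.nil_append, List.foldl_cons, List.foldl_nil]
      rw [solveWordVal_eq, pvSumRev]
  | cons c rest ih =>
    simp only [PySem.Chars.split₀.go, List.foldl]
    by_cases hs : PySem.Chars.isspace c = true
    · rw [if_pos hs]
      by_cases h : cur.isEmpty
      · have hc : cur = [] := List.isEmpty_iff.mp h
        subst hc
        rw [if_pos h]
        have h0 : ¬ (((List.map pvVal []).sum) > t) := by simp; omega
        simp only [hs, if_true, List.map_nil, List.sum_nil] at *
        rw [ih [] t ht]
        simp [h0]
      · rw [if_neg h]
        rw [split₀_go_acc rest [] [cur.reverse]]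
        simp only [List.reverse_cons, List.reverse_nil, List.nil_append, List.cons_append,
          List.foldl_cons]
        rw [solveWordVal_eq, pvSumRev]
        set t' := if (cur.map pvVal).sum > t then (cur.map pvVal).sum else t with ht'
        have ht'0 : 0 ≤ t' := by
          rw [ht']; split_ifs with hgt
          · omega
          · exact ht
        have := ih [] t' ht'0
        simp only [List.map_nil, List.sum_nil] at this
        rw [this]
        simp [hs]
    · rw [if_neg hs]
      have := ih (c :: cur) t ht
      simp only [List.map_cons, List.sum_cons] at this
      rw [this]
      have : (cur.map pvVal).sum + pvVal c = pvVal c + (cur.map pvVal).sum := by ring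
      simp [hs, this]

-- B's separator test matches: pvF sends vowels to ' ', everything else is unchanged
lemma sep_map (c : Char) :
    PySem.Chars.isspace (pvF c) = (solveVowel c || PySem.Chars.isspace c) := by
  by_cases hv : solveVowel c = true
  · simp [pvF, hv]
    decide
  · simp [pvF, hv]

lemma val_map (c : Char) (h : (solveVowel c || PySem.Chars.isspace c) = false) :
    pvVal (pvF c) = pvVal c := by
  simp only [Bool.or_eq_false_iff] at h
  simp [pvF, h.1]

lemma bfold_map (cs : List Char) (p : Int × Int) :
    (cs.map pvF).foldl
      (fun (p : Int × Int) c =>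
        if PySem.Chars.isspace c then (if p.2 > p.1 then p.2 else p.1, 0)
        else (p.1, p.2 + pvVal c)) p
    = cs.foldl
      (fun (p : Int × Int) c =>
        if solveVowel c || PySem.Chars.isspace c then (if p.2 > p.1 then p.2 else p.1, 0)
        else (p.1, p.2 + pvVal c)) p := by
  induction cs generalizing p with
  | nil => rfl
  | cons c t ih =>
    simp only [List.map_cons, List.foldl_cons, sep_map]
    by_cases h : (solveVowel c || PySem.Chars.isspace c) = true
    · rw [if_pos h, if_pos h]
      exact ih _
    · have h' := eq_false_of_ne_true h
      rw [if_neg h, if_neg h, val_map c h']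
      exact ih _

-- ===== VERDICT (by name: the statement is the Claim_ definition above) =====
theorem solve_spec : Claim_equal_solve := by
  intro s _
  unfold Spec_solve solve solve_alt
  rw [solveRepl_eq_map]
  unfold PySem.Chars.split₀
  have h := main_inv (s.toList.map pvF) [] 0 le_rfl
  simp only [List.map_nil, List.sum_nil] at h
  rw [h, bfold_map]
  simp [pvVal]
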